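-- pv_equiv track=rewrite | github.com/saladinbd/algoexpertsolution | maximize_expression.py | maximizeExpression
-- ===== SOURCE A (Python) =====
-- def maximizeExpression(array):
--     if len(array) < 4:
--         return 0
--
--     maxA = [float("-inf") for _ in array]
--     maxAB = [float("-inf") for _ in array]
--     maxABC = [float("-inf") for _ in array]
--     maxABCD = [float("-inf") for _ in array]
--
--     for i, num in enumerate(array):
--         if i == 0:
--             maxA[i] = num
--         else:
--             maxA[i] = max(maxA[i-1], num)
--
--         if i >= 1:
--             maxAB[i] = max(maxAB[i-1], maxA[i-1] - num)
--
--         if i >= 2: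
--             maxABC[i] = max(maxABC[i-1], maxAB[i-1] + num)
--
--         if i >= 3:
--             maxABCD[i] = max(maxABCD[i-1], maxABC[i-1] - num)
--
--     return maxABCD[-1]
-- ===== SOURCE B (Python) =====
-- def maximizeExpression(array):
--     if len(array) < 4:
--         return 0
--     n = len(array)
--     best = None
--     for i in range(n):
--         for j in range(i + 1, n):
--             for k in range(j + 1, n):
--                 for l in range(k + 1, n):
--                     value = array[i] - array[j] + array[k] - array[l]
--                     if best is None or value > best:
--                         best = value
--     return best
-- ===== Notes on version B (the rewrite author's own statement) =====
-- stated objective: alternative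
-- what changed: Replaced the four prefix-DP arrays and single linear pass by a direct brute-force enumeration of all index quadruples i<j<k<l with four nested loops, seeding the running maximum from the first quadruple (None sentinel) instead of 0.
import Mathlib
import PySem

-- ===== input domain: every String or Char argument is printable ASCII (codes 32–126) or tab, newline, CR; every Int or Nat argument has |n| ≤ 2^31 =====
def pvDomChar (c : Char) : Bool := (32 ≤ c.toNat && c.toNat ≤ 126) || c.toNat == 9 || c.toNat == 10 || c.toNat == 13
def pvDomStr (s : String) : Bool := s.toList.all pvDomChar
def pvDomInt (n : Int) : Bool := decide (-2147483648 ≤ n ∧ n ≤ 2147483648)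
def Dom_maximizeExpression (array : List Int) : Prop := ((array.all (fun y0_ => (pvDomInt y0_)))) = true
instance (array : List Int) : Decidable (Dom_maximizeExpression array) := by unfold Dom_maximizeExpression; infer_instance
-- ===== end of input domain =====

-- B replaces A's four prefix-DP arrays and single pass by a brute-force O(n^4) enumeration of
-- all index quadruples i<j<k<l (objective: alternative algorithm; B is not faster).

-- ===== PORT A =====
-- Python's float('-inf') sentinel is modelled as `none`; `omax` is Python's max with -inf as bottom.
def omax : Option Int → Option Int → Option Int
  | none, b => b
  | some x, none => some x
  | some x, some y => some (max x y)

-- the four DP arrays are only read at indices i and i-1, so the loop carries the current cells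
def maximizeExpression (array : List Int) : Int :=
  if array.length < 4 then 0
  else
    let s := array.foldl
      (fun (s : Nat × Option Int × Option Int × Option Int × Option Int) num =>
        let (i, a, ab, abc, abcd) := s
        let a' := if i = 0 then some num else omax a (some num)
        let ab' := if 1 ≤ i then omax ab (a.map (fun v => v - num)) else ab
        let abc' := if 2 ≤ i then omax abc (ab.map (fun v => v + num)) else abc
        let abcd' := if 3 ≤ i then omax abcd (abc.map (fun v => v - num)) else abcd
        (i + 1, a', ab', abc', abcd'))
      (0, none, none, none, none)
    (s.2.2.2.2).getD 0   -- maxABCD[-1]; for len ≥ 4 it is never the -inf sentinel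

-- ===== PORT B =====
-- Python's `best is None or value > best` update
def bUpdate (best : Option Int) (value : Int) : Option Int :=
  match best with
  | none => some value
  | some b => if b < value then some value else some b

def maximizeExpression_alt (array : List Int) : Int :=
  if array.length < 4 then 0
  else
    let n : Int := array.length
    let best := (PySem.List.pyRange 0 n 1).foldl (fun best i =>
      (PySem.List.pyRange (i + 1) n 1).foldl (fun best j =>
        (PySem.List.pyRange (j + 1) n 1).foldl (fun best k =>
          (PySem.List.pyRange (k + 1) n 1).foldl (fun best l =>
            bUpdate best (PySem.List.pyGetD array i 0 - PySem.List.pyGetD array j 0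
              + PySem.List.pyGetD array k 0 - PySem.List.pyGetD array l 0)) best) best) best) none
    best.getD 0   -- for len ≥ 4 at least one quadruple exists, so best is never None

-- ===== PRECONDITION & SPEC =====
def Spec_maximizeExpression (array : List Int) (out : Int) : Prop := out = maximizeExpression_alt array
instance (array : List Int) (out : Int) : Decidable (Spec_maximizeExpression array out) := by unfold Spec_maximizeExpression; infer_instance

-- ===== CLAIM (what is proved, stated in full; the proofs are below) =====
def Claim_equal_maximizeExpression : Prop := ∀ (array : List Int), Dom_maximizeExpression array → Spec_maximizeExpression array (maximizeExpression array)

-- ===== LEMMAS AND PROOFS =====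

theorem omax_none_right (a : Option Int) : omax a none = a := by cases a <;> rfl

theorem omax_assoc (a b c : Option Int) : omax (omax a b) c = omax a (omax b c) := by
  cases a <;> cases b <;> cases c <;> simp [omax, max_assoc]

def omaxOf (L : List Int) : Option Int := L.foldl (fun acc v => omax acc (some v)) none

theorem foldl_omax (L : List Int) (acc : Option Int) :
    L.foldl (fun a v => omax a (some v)) acc = omax acc (omaxOf L) := by
  induction L generalizing acc with
  | nil => simp [omaxOf, omax_none_right]
  | cons x L ih =>
    simp only [List.foldl_cons, omaxOf]
    rw [ih, ih (omax none (some x)), ← omax_assoc]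
    rfl

theorem omaxOf_cons (x : Int) (L : List Int) : omaxOf (x :: L) = omax (some x) (omaxOf L) := by
  simp only [omaxOf, List.foldl_cons]
  exact foldl_omax L (omax none (some x))

theorem omaxOf_append (L1 L2 : List Int) :
    omaxOf (L1 ++ L2) = omax (omaxOf L1) (omaxOf L2) := by
  simp only [omaxOf, List.foldl_append]
  exact foldl_omax L2 _

theorem omaxOf_map (f : Int → Int) (hf : ∀ x y, max (f x) (f y) = f (max x y)) (L : List Int) :
    omaxOf (L.map f) = (omaxOf L).map f := by
  induction L with
  | nil => rfl
  | cons x L ih =>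
    rw [List.map_cons, omaxOf_cons, omaxOf_cons, ih]
    cases omaxOf L <;> simp [omax, hf]

theorem omaxOf_le (v : Int) (L : List Int) (hv : v ∈ L) :
    ∃ m, omaxOf L = some m ∧ v ≤ m := by
  induction L with
  | nil => cases hv
  | cons x L ih =>
    rw [omaxOf_cons]
    rcases List.mem_cons.1 hv with h | h
    · subst h
      cases h2 : omaxOf L with
      | none => exact ⟨v, rfl, le_refl v⟩
      | some m => exact ⟨max v m, rfl, le_max_left _ _⟩
    · obtain ⟨m, hm, hle⟩ := ih h
      rw [hm]
      exact ⟨max x m, rfl, le_trans hle (le_max_right _ _)⟩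

theorem omaxOf_mem (L : List Int) (m : Int) (h : omaxOf L = some m) : m ∈ L := by
  induction L generalizing m with
  | nil => simp [omaxOf] at h
  | cons x L ih =>
    rw [omaxOf_cons] at h
    cases h2 : omaxOf L with
    | none => rw [h2, omax_none_right] at h; simp_all
    | some m' =>
      rw [h2] at h
      simp only [omax, Option.some.injEq] at h
      subst h
      rcases max_cases x m' with ⟨he, _⟩ | ⟨he, _⟩
      · rw [he]; exact List.mem_cons_self
      · rw [he]; exact List.mem_cons_of_mem _ (ih m' h2)

theorem omaxOf_ext (L1 L2 : List Int) (h : ∀ v, v ∈ L1 ↔ v ∈ L2) :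
    omaxOf L1 = omaxOf L2 := by
  cases h1 : omaxOf L1 with
  | none =>
    cases h2 : omaxOf L2 with
    | none => rfl
    | some m =>
      obtain ⟨m', hm', _⟩ := omaxOf_le m L1 ((h m).2 (omaxOf_mem L2 m h2))
      rw [h1] at hm'; cases hm'
  | some m =>
    obtain ⟨m2, hm2, hle2⟩ := omaxOf_le m L2 ((h m).1 (omaxOf_mem L1 m h1))
    obtain ⟨m1, hm1, hle1⟩ := omaxOf_le m2 L1 ((h m2).2 (omaxOf_mem L2 m2 hm2))
    rw [h1] at hm1
    rw [hm2]
    cases hm1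
    exact congrArg some (le_antisymm hle2 hle1)

-- canonical candidate lists: values of prefixes a, a-b, a-b+c, a-b+c-d grouped by the LAST index
def cand1 (xs : List Int) (m : Nat) : List Int := (List.range m).map (fun i => xs.getD i 0)
def cand2 (xs : List Int) (m : Nat) : List Int :=
  (List.range m).flatMap (fun j => (cand1 xs j).map (fun v => v - xs.getD j 0))
def cand3 (xs : List Int) (m : Nat) : List Int :=
  (List.range m).flatMap (fun k => (cand2 xs k).map (fun v => v + xs.getD k 0))
def cand4 (xs : List Int) (m : Nat) : List Int :=
  (List.range m).flatMap (fun l => (cand3 xs l).map (fun v => v - xs.getD l 0))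

theorem cand1_succ (xs : List Int) (m : Nat) :
    cand1 xs (m + 1) = cand1 xs m ++ [xs.getD m 0] := by simp [cand1, List.range_succ]
theorem cand2_succ (xs : List Int) (m : Nat) :
    cand2 xs (m + 1) = cand2 xs m ++ (cand1 xs m).map (fun v => v - xs.getD m 0) := by
  simp [cand2, List.range_succ]
theorem cand3_succ (xs : List Int) (m : Nat) :
    cand3 xs (m + 1) = cand3 xs m ++ (cand2 xs m).map (fun v => v + xs.getD m 0) := by
  simp [cand3, List.range_succ]
theorem cand4_succ (xs : List Int) (m : Nat) :
    cand4 xs (m + 1) = cand4 xs m ++ (cand3 xs m).map (fun v => v - xs.getD m 0) := by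
  simp [cand4, List.range_succ]

theorem cand2_nil (xs : List Int) (m : Nat) (h : m ≤ 1) : cand2 xs m = [] := by
  interval_cases m <;> simp [cand2, cand1]

theorem cand3_nil (xs : List Int) (m : Nat) (h : m ≤ 2) : cand3 xs m = [] := by
  interval_cases m <;> simp [cand3, cand2, cand1, List.range_succ]

-- the loop invariant of A's single pass
theorem dp_invariant (xs : List Int) (m : Nat) (hm : m ≤ xs.length) :
    (xs.take m).foldl
      (fun (s : Nat × Option Int × Option Int × Option Int × Option Int) num =>
        let (i, a, ab, abc, abcd) := s
        let a' := if i = 0 then some num else omax a (some num)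
        let ab' := if 1 ≤ i then omax ab (a.map (fun v => v - num)) else ab
        let abc' := if 2 ≤ i then omax abc (ab.map (fun v => v + num)) else abc
        let abcd' := if 3 ≤ i then omax abcd (abc.map (fun v => v - num)) else abcd
        (i + 1, a', ab', abc', abcd'))
      (0, none, none, none, none)
    = (m, omaxOf (cand1 xs m), omaxOf (cand2 xs m), omaxOf (cand3 xs m), omaxOf (cand4 xs m)) := by
  induction m with
  | zero => simp [cand1, cand2, cand3, cand4, omaxOf]
  | succ m ih =>
    have hm' : m < xs.length := by omega
    have htake : xs.take (m + 1) = xs.take m ++ [xs.getD m 0] := by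
      rw [List.take_add_one]
      simp [List.getD, hm']
    rw [htake, List.foldl_append, ih (by omega)]
    simp only [List.foldl_cons, List.foldl_nil]
    rw [cand1_succ, cand2_succ, cand3_succ, cand4_succ,
        omaxOf_append, omaxOf_append, omaxOf_append, omaxOf_append]
    rw [omaxOf_map _ (fun x y => max_sub_sub_right x y _),
        omaxOf_map _ (fun x y => max_add_add_right x y _),
        omaxOf_map _ (fun x y => max_sub_sub_right x y _)]
    refine Prod.ext rfl (Prod.ext ?_ (Prod.ext ?_ (Prod.ext ?_ ?_))) <;> simp only
    · by_cases h0 : m = 0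
      · subst h0; simp [cand1, omaxOf, omax]
      · simp [h0, omaxOf, omax]
    · by_cases h1 : 1 ≤ m
      · simp [h1]
      · have : m = 0 := by omega
        subst this
        simp [cand1, omaxOf, omax_none_right]
    · by_cases h2 : 2 ≤ m
      · simp [h2]
      · rw [cand2_nil xs m (by omega)]
        simp [omaxOf, omax_none_right, h2]
    · by_cases h3 : 3 ≤ m
      · simp [h3]
      · rw [cand3_nil xs m (by omega)]
        simp [omaxOf, omax_none_right, h3]

theorem maximizeExpression_eq_omaxOf (xs : List Int) (h : ¬ xs.length < 4) :
    maximizeExpression xs = (omaxOf (cand4 xs xs.length)).getD 0 := by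
  unfold maximizeExpression
  rw [if_neg h]
  have := dp_invariant xs xs.length (le_refl _)
  rw [List.take_length] at this
  simp only [this]

theorem bUpdate_eq_omax (best : Option Int) (v : Int) : bUpdate best v = omax best (some v) := by
  cases best with
  | none => rfl
  | some b =>
    simp only [bUpdate, omax]
    by_cases hlt : b < v
    · simp [hlt, max_eq_right hlt.le]
    · simp [hlt, max_eq_left (not_lt.1 hlt)]

theorem foldl_foldl_flatMap {α : Type} (g : α → List Int) (f : Option Int → Int → Option Int)
    (L : List α) (acc : Option Int) :
    L.foldl (fun a x => (g x).foldl f a) acc = (L.flatMap g).foldl f acc := by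
  induction L generalizing acc with
  | nil => rfl
  | cons x L ih => simp [List.flatMap_cons, List.foldl_append, ih]

-- the list of quadruple values B enumerates
def bvals (xs : List Int) : List Int :=
  (PySem.List.pyRange 0 (xs.length : Int) 1).flatMap (fun i =>
    (PySem.List.pyRange (i + 1) (xs.length : Int) 1).flatMap (fun j =>
      (PySem.List.pyRange (j + 1) (xs.length : Int) 1).flatMap (fun k =>
        (PySem.List.pyRange (k + 1) (xs.length : Int) 1).map (fun l =>
          PySem.List.pyGetD xs i 0 - PySem.List.pyGetD xs j 0
            + PySem.List.pyGetD xs k 0 - PySem.List.pyGetD xs l 0))))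

theorem alt_eq_omaxOf (xs : List Int) (h : ¬ xs.length < 4) :
    maximizeExpression_alt xs = (omaxOf (bvals xs)).getD 0 := by
  unfold maximizeExpression_alt
  rw [if_neg h]
  simp only [bUpdate_eq_omax]
  simp only [← List.foldl_map (f := fun l => PySem.List.pyGetD xs _ 0 - PySem.List.pyGetD xs _ 0
      + PySem.List.pyGetD xs _ 0 - PySem.List.pyGetD xs l 0)
      (g := fun a v => omax a (some v))]
  simp only [foldl_foldl_flatMap]
  rfl

theorem mem_cand4_iff (xs : List Int) (v : Int) :
    v ∈ cand4 xs xs.length ↔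
      ∃ i j k l : Nat, i < j ∧ j < k ∧ k < l ∧ l < xs.length ∧
        v = xs.getD i 0 - xs.getD j 0 + xs.getD k 0 - xs.getD l 0 := by
  simp only [cand4, cand3, cand2, cand1, List.mem_flatMap, List.mem_map, List.mem_range]
  constructor
  · rintro ⟨l, hl, w3, ⟨k, hk, w2, ⟨j, hj, w1, ⟨i, hi, rfl⟩, rfl⟩, rfl⟩, rfl⟩
    exact ⟨i, j, k, l, hi, hj, hk, hl, by ring⟩
  · rintro ⟨i, j, k, l, hij, hjk, hkl, hl, rfl⟩
    exact ⟨l, hl, _, ⟨k, hkl, _, ⟨j, hjk, _, ⟨i, hij, rfl⟩, rfl⟩, rfl⟩, by ring⟩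

theorem pyGetD_toNat (xs : List Int) (i : Int) (h0 : 0 ≤ i) (h : i < (xs.length : Int)) :
    PySem.List.pyGetD xs i 0 = xs.getD i.toNat 0 := by
  rw [PySem.List.pyGetD_eq_getElem xs 0 h0 h]
  simp [List.getD_eq_getElem?_getD, List.getElem?_eq_getElem (show i.toNat < xs.length by omega)]

theorem mem_bvals_iff (xs : List Int) (v : Int) :
    v ∈ bvals xs ↔
      ∃ i j k l : Nat, i < j ∧ j < k ∧ k < l ∧ l < xs.length ∧
        v = xs.getD i 0 - xs.getD j 0 + xs.getD k 0 - xs.getD l 0 := by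
  simp only [bvals, List.mem_flatMap, List.mem_map, PySem.List.mem_pyRange_one]
  constructor
  · rintro ⟨i, ⟨hi0, hin⟩, j, ⟨hj0, hjn⟩, k, ⟨hk0, hkn⟩, l, ⟨hl0, hln⟩, rfl⟩
    refine ⟨i.toNat, j.toNat, k.toNat, l.toNat, by omega, by omega, by omega, by omega, ?_⟩
    rw [pyGetD_toNat xs i (by omega) (by omega), pyGetD_toNat xs j (by omega) (by omega),
        pyGetD_toNat xs k (by omega) (by omega), pyGetD_toNat xs l (by omega) (by omega)]
  · rintro ⟨i, j, k, l, hij, hjk, hkl, hl, rfl⟩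
    refine ⟨(i : Int), by omega, (j : Int), by omega, (k : Int), by omega, (l : Int), by omega, ?_⟩
    rw [pyGetD_toNat xs i (by omega) (by omega), pyGetD_toNat xs j (by omega) (by omega),
        pyGetD_toNat xs k (by omega) (by omega), pyGetD_toNat xs l (by omega) (by omega)]
    simp

-- ===== VERDICT (by name: the statement is the Claim_ definition above) =====
theorem maximizeExpression_spec : Claim_equal_maximizeExpression := by
  intro array _
  unfold Spec_maximizeExpression
  by_cases h : array.length < 4
  · unfold maximizeExpression maximizeExpression_alt
    rw [if_pos h, if_pos h]
  · rw [maximizeExpression_eq_omaxOf array h, alt_eq_omaxOf array h]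
    rw [omaxOf_ext _ _ (fun v => (mem_cand4_iff array v).trans (mem_bvals_iff array v).symm)]
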